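-- pv_equiv track=rewrite | github.com/vivienhenz24/Orpheus-TTS | scripts/infer.py | deinterleave
-- ===== SOURCE A (Python) =====
-- AUDIO_TOKEN_BASE = 128266
--
-- LAYER_1_OFFSET = AUDIO_TOKEN_BASE + 4096
--
-- LAYER_2_OFFSET = AUDIO_TOKEN_BASE + 8192
--
-- def deinterleave(token_ids):
--     codes_l0, codes_l1, codes_l2 = [], [], []
--     for i in range(0, len(token_ids), 7):
--         if i + 7 > len(token_ids):
--             break
--         f = token_ids[i : i + 7]
--         codes_l0.append(f[0] - AUDIO_TOKEN_BASE)
--         codes_l1.append(f[1] - LAYER_1_OFFSET)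
--         codes_l2.append(f[2] - LAYER_2_OFFSET)
--         codes_l2.append(f[3] - LAYER_2_OFFSET - 4096)
--         codes_l1.append(f[4] - LAYER_1_OFFSET - 12288)
--         codes_l2.append(f[5] - LAYER_2_OFFSET - 12288)
--         codes_l2.append(f[6] - LAYER_2_OFFSET - 16384)
--     return codes_l0, codes_l1, codes_l2
-- ===== SOURCE B (Python) =====
-- AUDIO_TOKEN_BASE = 128266
--
-- LAYER_1_OFFSET = AUDIO_TOKEN_BASE + 4096
--
-- LAYER_2_OFFSET = AUDIO_TOKEN_BASE + 8192
--
-- def deinterleave(token_ids):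
--     end = 7 * (len(token_ids) // 7)
--     codes_l0 = [t - AUDIO_TOKEN_BASE for t in token_ids[0:end:7]]
--     codes_l1 = [x for pair in zip(
--         [t - LAYER_1_OFFSET for t in token_ids[1:end:7]],
--         [t - LAYER_1_OFFSET - 12288 for t in token_ids[4:end:7]],
--     ) for x in pair]
--     codes_l2 = [x for quad in zip(
--         [t - LAYER_2_OFFSET for t in token_ids[2:end:7]],
--         [t - LAYER_2_OFFSET - 4096 for t in token_ids[3:end:7]],
--         [t - LAYER_2_OFFSET - 12288 for t in token_ids[5:end:7]],
--         [t - LAYER_2_OFFSET - 16384 for t in token_ids[6:end:7]],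
--     ) for x in quad]
--     return codes_l0, codes_l1, codes_l2
-- ===== Notes on version B (the rewrite author's own statement) =====
-- stated objective: idiomatic
-- what changed: Replaces the index loop with break and per-frame appends by extended strided slices token_ids[p:7*(len//7):7] per layer position, interleaved pairwise via zip; no index arithmetic or explicit loop remains.
import Mathlib
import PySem

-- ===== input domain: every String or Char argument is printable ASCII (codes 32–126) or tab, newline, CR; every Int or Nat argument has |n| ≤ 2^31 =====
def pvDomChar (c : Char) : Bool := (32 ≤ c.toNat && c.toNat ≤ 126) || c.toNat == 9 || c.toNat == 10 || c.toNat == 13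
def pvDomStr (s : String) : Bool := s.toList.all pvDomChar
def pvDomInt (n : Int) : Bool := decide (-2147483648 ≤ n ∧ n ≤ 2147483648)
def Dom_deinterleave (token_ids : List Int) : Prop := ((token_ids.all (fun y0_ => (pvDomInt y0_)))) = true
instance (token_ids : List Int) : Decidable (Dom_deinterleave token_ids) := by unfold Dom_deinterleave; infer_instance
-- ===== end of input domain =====

-- B replaces A's index loop (with break) by per-position extended strided slices interleaved via zip: idiomatic, same O(n) cost.

def audioTokenBase : Int := 128266
def layer1Offset : Int := audioTokenBase + 4096
def layer2Offset : Int := audioTokenBase + 8192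

-- ===== PORT A =====
-- for i in range(0, len, 7) with break; f[k] via pyGetD (the guard i+7 ≤ len keeps every index in range, so the default 0 is never read)
def deinterleaveLoop (token_ids : List Int) (idxs : List Int) (acc : List Int × List Int × List Int) : List Int × List Int × List Int :=
  match idxs with
  | [] => acc
  | i :: rest =>
    if i + 7 > (token_ids.length : Int) then acc   -- break
    else
      let f := PySem.List.slice token_ids (some i) (some (i + 7))
      let l0 := acc.1
      let l1 := acc.2.1
      let l2 := acc.2.2
      deinterleaveLoop token_ids rest
        (l0 ++ [PySem.List.pyGetD f 0 0 - audioTokenBase],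
         l1 ++ [PySem.List.pyGetD f 1 0 - layer1Offset] ++ [PySem.List.pyGetD f 4 0 - layer1Offset - 12288],
         l2 ++ [PySem.List.pyGetD f 2 0 - layer2Offset] ++ [PySem.List.pyGetD f 3 0 - layer2Offset - 4096]
            ++ [PySem.List.pyGetD f 5 0 - layer2Offset - 12288] ++ [PySem.List.pyGetD f 6 0 - layer2Offset - 16384])

def deinterleave (token_ids : List Int) : List Int × List Int × List Int :=
  deinterleaveLoop token_ids (PySem.List.pyRange 0 (token_ids.length : Int) 7) ([], [], [])

-- ===== PORT B =====
-- token_ids[p:end:7] with end = 7*(len//7); slice? never raises here (step ≠ 0), so .getD [] is exact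
def deinterleave_alt (token_ids : List Int) : List Int × List Int × List Int :=
  let e : Int := 7 * PySem.Int.floordiv (token_ids.length : Int) 7
  let sl : Int → List Int := fun p => (PySem.List.slice? token_ids (some p) (some e) 7).getD []
  let codes_l0 := (sl 0).map (fun t => t - audioTokenBase)
  let codes_l1 := (((sl 1).map (fun t => t - layer1Offset)).zip
                   ((sl 4).map (fun t => t - layer1Offset - 12288))).flatMap (fun p => [p.1, p.2])
  let codes_l2 := ((((sl 2).map (fun t => t - layer2Offset)).zip
                    ((sl 3).map (fun t => t - layer2Offset - 4096))).zip
                   (((sl 5).map (fun t => t - layer2Offset - 12288)).zip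
                    ((sl 6).map (fun t => t - layer2Offset - 16384)))).flatMap
                   (fun q => [q.1.1, q.1.2, q.2.1, q.2.2])
  (codes_l0, codes_l1, codes_l2)

-- ===== PRECONDITION & SPEC =====
def Spec_deinterleave (token_ids : List Int) (out : List Int × List Int × List Int) : Prop := out = deinterleave_alt token_ids
instance (token_ids : List Int) (out : List Int × List Int × List Int) : Decidable (Spec_deinterleave token_ids out) := by unfold Spec_deinterleave; infer_instance

-- ===== CLAIM (what is proved, stated in full; the proofs are below) =====
def Claim_equal_deinterleave : Prop := ∀ (token_ids : List Int), Dom_deinterleave token_ids → Spec_deinterleave token_ids (deinterleave token_ids)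

-- ===== LEMMAS AND PROOFS =====

-- complete 7-frames of the stream, in order
def chunks7 : List Int → List (Int × Int × Int × Int × Int × Int × Int)
  | a :: b :: c :: d :: e :: f :: g :: r => (a, b, c, d, e, f, g) :: chunks7 r
  | _ => []

lemma chunks7_short (t : List Int) (h : t.length < 7) : chunks7 t = [] := by
  rw [chunks7.eq_def]
  split
  · simp only [List.length_cons] at h
    omega
  · rfl

lemma pyRange7_cons {a b : Int} (h : a < b) :
    PySem.List.pyRange a b 7 = a :: PySem.List.pyRange (a + 7) b 7 := by
  rw [PySem.List.pyRange_of_pos a b (by norm_num : (0:Int) < 7),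
      PySem.List.pyRange_of_pos (a+7) b (by norm_num : (0:Int) < 7), if_pos h]
  by_cases h7 : a + 7 < b
  · rw [if_pos h7]
    have hc : ((b - a + 7 - 1) / 7).toNat = ((b - (a + 7) + 7 - 1) / 7).toNat + 1 := by omega
    rw [hc, List.range_succ_eq_map, List.map_cons, List.map_map]
    congr 1
    · simp
    · apply List.map_congr_left
      intro k _
      simp only [Function.comp_apply, Nat.succ_eq_add_one]
      push_cast
      ring
  · rw [if_neg h7]
    have hc : ((b - a + 7 - 1) / 7).toNat = 1 := by omega
    rw [hc]
    simp

lemma pyRange7_nil {a b : Int} (h : b ≤ a) : PySem.List.pyRange a b 7 = [] := by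
  rw [PySem.List.pyRange_of_pos a b (by norm_num : (0:Int) < 7), if_neg (not_lt.mpr h)]
  rfl

-- a strided slice [p : 7*(len//7) : 7] read off as a map over the frame count
lemma slice7_eq (t : List Int) (p : Nat) (hp : p < 7) :
    (PySem.List.slice? t (some (p : Int)) (some (7 * ((t.length / 7 : Nat) : Int))) 7).getD []
      = (List.range (t.length / 7)).map (fun k => t.getD (p + 7 * k) 0) := by
  simp only [PySem.List.slice?, PySem.List.sliceIndices]
  norm_num
  have hp0 : ¬ ((p : Int) < 0) := by omega
  have hq0 : ¬ (7 * ((t.length : Int) / 7) < 0) := by omega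
  have hmin2 : min (7 * ((t.length : Int) / 7)) ((t.length : Int)) = 7 * ((t.length : Int) / 7) := by omega
  simp only [if_neg hp0, if_neg hq0, hmin2]
  by_cases hN0 : t.length / 7 = 0
  · have hcond : ¬ (min ((p : Int)) ((t.length : Int)) < 7 * ((t.length : Int) / 7)) := by omega
    rw [if_neg hcond, hN0]
    simp
  · have hminp : min ((p : Int)) ((t.length : Int)) = (p : Int) := by omega
    rw [hminp]
    have hcond : ((p : Int)) < 7 * ((t.length : Int) / 7) := by omega
    rw [if_pos hcond]
    have hcount : ((7 * ((t.length : Int) / 7) - (p : Int) + 7 - 1) / 7).toNat = t.length / 7 := by omega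
    rw [hcount]
    have key : ∀ k ∈ List.range (t.length / 7),
        t[((p : Int) + 7 * (k : Int)).toNat]? = some (t[p + 7 * k]?.getD 0) := by
      intro k hk
      rw [List.mem_range] at hk
      have hlt : p + 7 * k < t.length := by omega
      have hidx : ((p : Int) + 7 * (k : Int)).toNat = p + 7 * k := by omega
      rw [hidx]
      simp [List.getElem?_eq_getElem hlt]
    rw [List.filterMap_congr key]
    simp

lemma exists_cons7 (l : List Int) (h : 7 ≤ l.length) :
    ∃ a b c d e f g r, l = a :: b :: c :: d :: e :: f :: g :: r := by
  rcases l with _ | ⟨a, _ | ⟨b, _ | ⟨c, _ | ⟨d, _ | ⟨e, _ | ⟨f, _ | ⟨g, r⟩⟩⟩⟩⟩⟩⟩ <;>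
    first
      | exact ⟨a, b, c, d, e, f, g, r, rfl⟩
      | simp at h

lemma range_map_getD_eq_chunks (t : List Int) (p : Nat) (hp : p < 7) :
    (List.range (t.length / 7)).map (fun k => t.getD (p + 7 * k) 0)
      = (chunks7 t).map (fun f => [f.1, f.2.1, f.2.2.1, f.2.2.2.1, f.2.2.2.2.1, f.2.2.2.2.2.1, f.2.2.2.2.2.2].getD p 0) := by
  induction t using chunks7.induct with
  | case1 a b c d e f g r ih =>
    have hlen : (a :: b :: c :: d :: e :: f :: g :: r).length / 7 = r.length / 7 + 1 := by
      simp only [List.length_cons]; omega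
    rw [hlen, List.range_succ_eq_map, List.map_cons, List.map_map,
        show chunks7 (a :: b :: c :: d :: e :: f :: g :: r) = (a, b, c, d, e, f, g) :: chunks7 r from rfl,
        List.map_cons]
    refine List.cons_eq_cons.mpr ⟨?_, ?_⟩
    · interval_cases p <;> rfl
    · rw [← ih]
      apply List.map_congr_left
      intro k _
      simp only [Function.comp_apply, Nat.succ_eq_add_one]
      rw [show p + 7 * (k + 1) = ((((((p + 7 * k + 1) + 1) + 1) + 1) + 1) + 1) + 1 by ring]
      simp
  | case2 t h =>
    by_cases h7 : 7 ≤ t.length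
    · obtain ⟨a, b, c, d, e, f, g, r, rfl⟩ := exists_cons7 t h7
      exact (h a b c d e f g r rfl).elim
    · rw [Nat.div_eq_of_lt (by omega), chunks7_short t (by omega)]
      simp

lemma loopA_eq (t : List Int) : ∀ (i : Nat) (l0 l1 l2 : List Int),
    deinterleaveLoop t (PySem.List.pyRange (i : Int) (t.length : Int) 7) (l0, l1, l2)
      = (l0 ++ (chunks7 (t.drop i)).map (fun f => f.1 - audioTokenBase),
         l1 ++ (chunks7 (t.drop i)).flatMap (fun f => [f.2.1 - layer1Offset, f.2.2.2.2.1 - layer1Offset - 12288]),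
         l2 ++ (chunks7 (t.drop i)).flatMap (fun f =>
            [f.2.2.1 - layer2Offset, f.2.2.2.1 - layer2Offset - 4096,
             f.2.2.2.2.2.1 - layer2Offset - 12288, f.2.2.2.2.2.2 - layer2Offset - 16384])) := by
  have main : ∀ (m i : Nat), t.length - i ≤ m → ∀ (l0 l1 l2 : List Int),
      deinterleaveLoop t (PySem.List.pyRange (i : Int) (t.length : Int) 7) (l0, l1, l2)
        = (l0 ++ (chunks7 (t.drop i)).map (fun f => f.1 - audioTokenBase),
           l1 ++ (chunks7 (t.drop i)).flatMap (fun f => [f.2.1 - layer1Offset, f.2.2.2.2.1 - layer1Offset - 12288]),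
           l2 ++ (chunks7 (t.drop i)).flatMap (fun f =>
              [f.2.2.1 - layer2Offset, f.2.2.2.1 - layer2Offset - 4096,
               f.2.2.2.2.2.1 - layer2Offset - 12288, f.2.2.2.2.2.2 - layer2Offset - 16384])) := by
    intro m
    induction m with
    | zero =>
      intro i hle l0 l1 l2
      have hge : t.length ≤ i := by omega
      rw [pyRange7_nil (by exact_mod_cast hge), List.drop_eq_nil_of_le hge]
      simp [deinterleaveLoop, chunks7]
    | succ m ih =>
      intro i hle l0 l1 l2
      by_cases hbig : i + 7 ≤ t.length
      · have hlt : (i : Int) < (t.length : Int) := by exact_mod_cast (by omega : i < t.length)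
        obtain ⟨a, b, c, d, e, f, g, r, hdec⟩ := exists_cons7 (t.drop i) (by simp; omega)
        rw [pyRange7_cons hlt]
        simp only [deinterleaveLoop]
        rw [if_neg (by omega)]
        have hslice : PySem.List.slice t (some (i : Int)) (some ((i : Int) + 7)) = [a, b, c, d, e, f, g] := by
          rw [PySem.List.slice_toNat t (by omega : (0:Int) ≤ (i : Int)) (by omega : (0:Int) ≤ (i : Int) + 7)]
          rw [show ((i : Int)).toNat = i from by omega, show (((i : Int)) + 7).toNat = i + 7 from by omega,
              show i + 7 - i = 7 from by omega, hdec]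
          rfl
        rw [hslice]
        have hcast : (i : Int) + 7 = ((i + 7 : Nat) : Int) := by push_cast; ring
        rw [hcast, ih (i + 7) (by omega)]
        have hdrop : t.drop (i + 7) = r := by
          rw [← List.drop_drop, hdec]
          rfl
        rw [hdrop, hdec,
            show chunks7 (a :: b :: c :: d :: e :: f :: g :: r) = (a, b, c, d, e, f, g) :: chunks7 r from rfl]
        simp [PySem.List.pyGetD]
      · by_cases hin : i < t.length
        · have hlt : (i : Int) < (t.length : Int) := by exact_mod_cast hin
          rw [pyRange7_cons hlt]
          simp only [deinterleaveLoop]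
          rw [if_pos (by omega)]
          rw [chunks7_short (t.drop i) (by simp; omega)]
          simp
        · rw [pyRange7_nil (by exact_mod_cast (by omega : t.length ≤ i)),
              List.drop_eq_nil_of_le (by omega), chunks7_short [] (by simp)]
          simp [deinterleaveLoop]
  intro i l0 l1 l2
  exact main (t.length - i) i le_rfl l0 l1 l2

-- ===== VERDICT (by name: the statement is the Claim_ definition above) =====
theorem deinterleave_spec : Claim_equal_deinterleave := by
  intro t _
  unfold Spec_deinterleave deinterleave deinterleave_alt
  have hA := loopA_eq t 0 [] [] []
  push_cast at hA
  simp only [List.drop_zero, List.nil_append] at hA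
  rw [hA]
  have hfd : PySem.Int.floordiv ((t.length : Int)) 7 = ((t.length / 7 : Nat) : Int) := by
    exact_mod_cast PySem.Int.floordiv_natCast t.length 7
  have h0 := slice7_eq t 0 (by norm_num)
  have h1 := slice7_eq t 1 (by norm_num)
  have h2 := slice7_eq t 2 (by norm_num)
  have h3 := slice7_eq t 3 (by norm_num)
  have h4 := slice7_eq t 4 (by norm_num)
  have h5 := slice7_eq t 5 (by norm_num)
  have h6 := slice7_eq t 6 (by norm_num)
  rw [range_map_getD_eq_chunks t 0 (by norm_num)] at h0
  rw [range_map_getD_eq_chunks t 1 (by norm_num)] at h1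
  rw [range_map_getD_eq_chunks t 2 (by norm_num)] at h2
  rw [range_map_getD_eq_chunks t 3 (by norm_num)] at h3
  rw [range_map_getD_eq_chunks t 4 (by norm_num)] at h4
  rw [range_map_getD_eq_chunks t 5 (by norm_num)] at h5
  rw [range_map_getD_eq_chunks t 6 (by norm_num)] at h6
  simp only [Nat.cast_ofNat, Nat.cast_zero, Nat.cast_one] at h0 h1 h2 h3 h4 h5 h6
  rw [hfd]
  simp only [h0, h1, h2, h3, h4, h5, h6]
  simp [List.zip_map', List.map_map, List.flatMap_map, Function.comp]
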